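-- pv_equiv track=rewrite | github.com/levistovall/crypto-keeper | Python_Solutions/basic_cryptanalysis.py | get_all_key_value_combos
-- ===== SOURCE A (Python) =====
-- def get_all_key_value_combos(keys, values):
--     dict_list = []
--     if len(keys) == 0:
--         return {}
--     elif len(keys) == 1:
--         return [{keys[0]:v} for v in values]
--
--     else:
--         for i in range(len(values)):
--             d = {keys[0]:values[i]}
--             new_values = values[:]
--             del new_values[i]
--
--             minus_one = get_all_key_value_combos(keys[1:], new_values)
--             for j in range(len(minus_one)):
--                 c = d.copy()
--                 c.update(minus_one[j])
--                 dict_list.append(c)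
--
--         return dict_list
-- ===== SOURCE B (Python) =====
-- def get_all_key_value_combos(keys, values):
--     # Iterative breadth-first expansion over the keys instead of A's recursion:
--     # each state is (assignment-so-far as a pair list, values still unused).
--     states = [([], values)]
--     for k in keys:
--         states = [(pairs + [(k, rem[i])], rem[:i] + rem[i+1:])
--                   for pairs, rem in states
--                   for i in range(len(rem))]
--     return [dict(pairs) for pairs, _ in states]
-- ===== Notes on version B (the rewrite author's own statement) =====
-- stated objective: alternative
-- what changed: A's hand-written recursion over the keys (with an inner loop copying and updating each recursive result dict) is replaced by an iterative breadth-first expansion of partial (assignment, remaining-values) states, building each result dict once at the end.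
-- outside the precondition, e.g. on get_all_key_value_combos([], ['x']): A returns {}, B returns [{}]
import Mathlib
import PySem

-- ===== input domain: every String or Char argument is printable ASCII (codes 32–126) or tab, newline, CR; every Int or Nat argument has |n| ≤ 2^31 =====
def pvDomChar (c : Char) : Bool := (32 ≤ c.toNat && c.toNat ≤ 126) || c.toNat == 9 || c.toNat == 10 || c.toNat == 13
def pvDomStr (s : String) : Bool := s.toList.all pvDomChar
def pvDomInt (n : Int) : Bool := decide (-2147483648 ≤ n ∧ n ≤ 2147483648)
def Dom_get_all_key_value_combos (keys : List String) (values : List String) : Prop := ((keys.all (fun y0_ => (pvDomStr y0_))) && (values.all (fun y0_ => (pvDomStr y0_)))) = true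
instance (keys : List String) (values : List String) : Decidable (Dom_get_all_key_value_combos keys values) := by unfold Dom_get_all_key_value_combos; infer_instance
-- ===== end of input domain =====

-- B replaces A's recursion over keys by an iterative breadth-first expansion of
-- partial (assignment, remaining-values) states; objective: alternative decomposition.


-- Python dict assignment d[k] = v on an insertion-ordered association list:
-- overwrite in place on the first occurrence of the key, otherwise append (exact).
def pvIns : List (String × String) → String → String → List (String × String)
  | [], k, v => [(k, v)]
  | (k', v') :: t, k, v => if k' == k then (k', v) :: t else (k', v') :: pvIns t k v

-- ===== PORT A =====
def get_all_key_value_combos : List String → List String → List (List (String × String))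
  | [], _ => []
      -- Python returns the bare dict {} here, which is not a list of dicts; Pre_ excludes keys = []
  | [k], values => values.map (fun v => [(k, v)])
  | k :: k2 :: ks, values =>
      (List.range values.length).foldl (fun dict_list i =>
        let d : List (String × String) := [(k, values.getD i "")]  -- i < len(values): getD is exact
        let new_values := values.take i ++ values.drop (i + 1)     -- new_values = values[:]; del new_values[i]
        let minus_one := get_all_key_value_combos (k2 :: ks) new_values
        (List.range minus_one.length).foldl (fun dl j =>
          -- c = d.copy(); c.update(minus_one[j]); dict_list.append(c)
          dl ++ [(minus_one.getD j []).foldl (fun c p => pvIns c p.1 p.2) d]) dict_list) []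

-- ===== PORT B =====
def get_all_key_value_combos_alt (keys : List String) (values : List String) : List (List (String × String)) :=
  let states := keys.foldl
    (fun states k => states.flatMap (fun s =>
      (List.range s.2.length).map (fun i =>
        (s.1 ++ [(k, s.2.getD i "")], s.2.take i ++ s.2.drop (i + 1)))))
    [(([] : List (String × String)), values)]
  states.map (fun s => s.1.foldl (fun c p => pvIns c p.1 p.2) [])

-- ===== PRECONDITION & SPEC =====
-- Pre_ excludes keys = [], where A returns a bare dict {} — not a value of the declared
-- list-of-dicts return type (B returns the natural [{}] there).
def Pre_get_all_key_value_combos (keys : List String) (values : List String) : Prop := keys ≠ []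
instance (keys : List String) (values : List String) : Decidable (Pre_get_all_key_value_combos keys values) := by unfold Pre_get_all_key_value_combos; infer_instance

def pvWitness_get_all_key_value_combos : List String × List String := (["a", "b"], ["x", "y", "z"])

def Spec_get_all_key_value_combos (keys : List String) (values : List String) (out : List (List (String × String))) : Prop := out = get_all_key_value_combos_alt keys values
instance (keys : List String) (values : List String) (out : List (List (String × String))) : Decidable (Spec_get_all_key_value_combos keys values out) := by unfold Spec_get_all_key_value_combos; infer_instance

-- ===== CLAIM (what is proved, stated in full; the proofs are below) =====
def Claim_equal_get_all_key_value_combos : Prop := ∀ (keys : List String) (values : List String), Dom_get_all_key_value_combos keys values → Pre_get_all_key_value_combos keys values → Spec_get_all_key_value_combos keys values (get_all_key_value_combos keys values)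

-- ===== LEMMAS AND PROOFS =====

-- d.update(t): fold Python assignment over the pairs of t
def pvUpd (d : List (String × String)) (t : List (String × String)) : List (String × String) :=
  t.foldl (fun c p => pvIns c p.1 p.2) d

-- replace the value at the FIRST occurrence of key k (identity if k absent)
def pvRF : List (String × String) → String → String → List (String × String)
  | [], _, _ => []
  | (k', v') :: t, k, v => if k' == k then (k', v) :: t else (k', v') :: pvRF t k v

-- the common raw search tree: all (assignment pair list, leftover values) in emission order
def rawS : List String → List String → List (List (String × String) × List String)
  | [], rem => [([], rem)]
  | k :: ks, rem => (List.range rem.length).flatMap (fun i =>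
      (rawS ks (rem.take i ++ rem.drop (i + 1))).map
        (fun s => ((k, rem.getD i "") :: s.1, s.2)))

theorem keys_pvIns (d : List (String × String)) (k v) :
    (pvIns d k v).map Prod.fst =
      if k ∈ d.map Prod.fst then d.map Prod.fst else d.map Prod.fst ++ [k] := by
  induction d with
  | nil => simp [pvIns]
  | cons p t ih =>
    obtain ⟨k2, v2⟩ := p
    by_cases hb : k2 == k
    · have hk := eq_of_beq hb
      subst hk
      simp [pvIns]
    · have hne : k2 ≠ k := by simpa using hb
      simp only [pvIns, hb, List.map_cons, List.mem_cons]
      split_ifs with h1 h2 h3 <;> simp_all [Ne.symm hne]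

theorem mem_keys_pvIns_self (d : List (String × String)) (k v) : k ∈ (pvIns d k v).map Prod.fst := by
  rw [keys_pvIns]
  split_ifs with h
  · exact h
  · simp

theorem mem_keys_pvIns_of_mem (d : List (String × String)) (k v k') (h : k' ∈ d.map Prod.fst) :
    k' ∈ (pvIns d k v).map Prod.fst := by
  rw [keys_pvIns]
  split_ifs <;> simp [h]

theorem nodup_keys_pvIns (d : List (String × String)) (k v) (h : (d.map Prod.fst).Nodup) :
    ((pvIns d k v).map Prod.fst).Nodup := by
  rw [keys_pvIns]
  split_ifs with hm
  · exact h
  · simp [List.nodup_append, h]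
    intro a x hax hak
    subst hak
    exact hm (List.mem_map.mpr ⟨(a, x), hax, rfl⟩)

theorem pvRF_pvIns_self (d : List (String × String)) (k v v') :
    pvRF (pvIns d k v') k v = pvIns d k v := by
  induction d with
  | nil => simp [pvIns, pvRF]
  | cons p t ih =>
    obtain ⟨k2, v2⟩ := p
    by_cases hb : k2 == k
    · simp [pvIns, pvRF, hb]
    · simp [pvIns, pvRF, hb, ih]

theorem pvRF_pvIns_comm (d : List (String × String)) (k v k₂ v₂) (h : k ≠ k₂) :
    pvRF (pvIns d k₂ v₂) k v = pvIns (pvRF d k v) k₂ v₂ := by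
  induction d with
  | nil =>
    have hb : (k₂ == k) = false := by simpa using (Ne.symm h)
    simp [pvIns, pvRF, hb]
  | cons p t ih =>
    obtain ⟨k3, v3⟩ := p
    by_cases hb2 : k3 == k₂
    · have hb1 : (k3 == k) = false := by
        have : k3 = k₂ := eq_of_beq hb2
        simpa [this] using (Ne.symm h)
      simp [pvIns, pvRF, hb2, hb1]
    · by_cases hb1 : k3 == k
      · have hb2' : (k == k₂) = false := by simpa using h
        have hk3 : k3 = k := eq_of_beq hb1
        simp [pvIns, pvRF, hk3, hb2']
      · simp [pvIns, pvRF, hb2, hb1, ih]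

theorem pvIns_eq_pvRF (d : List (String × String)) (k v) (h : k ∈ d.map Prod.fst) :
    pvIns d k v = pvRF d k v := by
  induction d with
  | nil => simp at h
  | cons p t ih =>
    obtain ⟨k2, v2⟩ := p
    by_cases hb : k2 == k
    · simp [pvIns, pvRF, hb]
    · have hmem : k ∈ t.map Prod.fst := by
        simp only [List.map_cons, List.mem_cons] at h
        rcases h with h | h
        · exact absurd (beq_iff_eq.mpr h.symm) hb
        · exact h
      simp [pvIns, pvRF, hb, ih hmem]

theorem mem_keys_pvUpd (e d : List (String × String)) (k) (h : k ∈ d.map Prod.fst) :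
    k ∈ (pvUpd d e).map Prod.fst := by
  induction e generalizing d with
  | nil => simpa [pvUpd] using h
  | cons p e2 ih =>
    show k ∈ (pvUpd (pvIns d p.1 p.2) e2).map Prod.fst
    exact ih _ (mem_keys_pvIns_of_mem d p.1 p.2 k h)

theorem pvRF_pvUpd (e d : List (String × String)) (k v) (h : k ∉ e.map Prod.fst) :
    pvRF (pvUpd d e) k v = pvUpd (pvRF d k v) e := by
  induction e generalizing d with
  | nil => rfl
  | cons p e2 ih =>
    obtain ⟨k2, v2⟩ := p
    simp only [List.map_cons, List.mem_cons, not_or] at h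
    obtain ⟨hne, hnm⟩ := h
    show pvRF (pvUpd (pvIns d k2 v2) e2) k v = pvUpd (pvIns (pvRF d k v) k2 v2) e2
    rw [ih (pvIns d k2 v2) hnm, pvRF_pvIns_comm d k v k2 v2 hne]

theorem pvY (e d : List (String × String)) (k v v') (h : k ∉ e.map Prod.fst) :
    pvUpd (pvIns d k v) e = pvIns (pvUpd (pvIns d k v') e) k v := by
  rw [pvIns_eq_pvRF _ k v
    (mem_keys_pvUpd e (pvIns d k v') k (mem_keys_pvIns_self d k v'))]
  rw [pvRF_pvUpd e (pvIns d k v') k v h, pvRF_pvIns_self d k v v']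

theorem pvU1 (e d : List (String × String)) (k v) (h : (e.map Prod.fst).Nodup) :
    pvUpd d (pvIns e k v) = pvIns (pvUpd d e) k v := by
  induction e generalizing d with
  | nil => rfl
  | cons p e1 ih =>
    obtain ⟨k1, v1⟩ := p
    simp only [List.map_cons, List.nodup_cons] at h
    obtain ⟨hnm, hnd⟩ := h
    by_cases hb : k1 == k
    · have hk : k1 = k := eq_of_beq hb
      subst hk
      show pvUpd d (pvIns ((k1, v1) :: e1) k1 v) = pvIns (pvUpd (pvIns d k1 v1) e1) k1 v
      simp only [pvIns, BEq.rfl, if_true]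
      rw [← pvY e1 d k1 v v1 hnm]
      rfl
    · show pvUpd d (pvIns ((k1, v1) :: e1) k v) = pvIns (pvUpd (pvIns d k1 v1) e1) k v
      simp only [pvIns, hb]
      show pvUpd (pvIns d k1 v1) (pvIns e1 k v) = _
      exact ih (pvIns d k1 v1) hnd

theorem pvJ (t e d : List (String × String)) (h : (e.map Prod.fst).Nodup) :
    pvUpd d (pvUpd e t) = pvUpd (pvUpd d e) t := by
  induction t generalizing e d with
  | nil => rfl
  | cons p t1 ih =>
    obtain ⟨k, v⟩ := p
    show pvUpd d (pvUpd (pvIns e k v) t1) = pvUpd (pvIns (pvUpd d e) k v) t1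
    rw [ih (pvIns e k v) d (nodup_keys_pvIns e k v h), pvU1 e d k v h]

theorem foldl_app {α β : Type} (l : List α) (h : α → List β) (dl : List β) :
    l.foldl (fun acc x => acc ++ h x) dl = dl ++ l.flatMap h := by
  induction l generalizing dl with
  | nil => simp
  | cons x l ih => simp [ih, List.flatMap_cons]

theorem map_range_getD {α β : Type} (l : List α) (dflt : α) (f : α → β) :
    (List.range l.length).map (fun i => f (l.getD i dflt)) = l.map f := by
  induction l with
  | nil => simp
  | cons x l ih =>
    simp [List.range_succ_eq_map, List.map_map, Function.comp_def]
    exact ih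

theorem flatMap_single {α β : Type} (l : List α) (f : α → β) :
    l.flatMap (fun x => [f x]) = l.map f := by
  induction l with
  | nil => rfl
  | cons x l ih => simp [ih]

theorem pvJ_single (t d : List (String × String)) (k2 w : String) :
    List.foldl (fun c p => pvIns c p.1 p.2) d (List.foldl (fun c p => pvIns c p.1 p.2) [(k2, w)] t)
      = List.foldl (fun c p => pvIns c p.1 p.2) (pvIns d k2 w) t := by
  have h := pvJ t [(k2, w)] d (by simp)
  simpa [pvUpd, pvIns] using h

theorem A_char_aux (ks : List String) : ∀ (k : String) (values : List String),
    get_all_key_value_combos (k :: ks) values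
      = (rawS (k :: ks) values).map (fun s => pvUpd [] s.1) := by
  induction ks with
  | nil =>
    intro k values
    simp only [get_all_key_value_combos, rawS]
    rw [← map_range_getD values "" (fun v => [(k, v)])]
    simp [flatMap_single, pvUpd, pvIns, List.map_map, Function.comp_def]
  | cons k2 ks2 ih =>
    intro k values
    simp only [get_all_key_value_combos]
    simp only [foldl_app, List.nil_append]
    simp only [flatMap_single]
    simp only [ih]
    simp only [map_range_getD]
    simp only [List.map_map, Function.comp_def]
    simp [rawS, List.map_flatMap, List.map_map, Function.comp_def, pvUpd, pvIns, pvJ_single]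

theorem A_char (keys values : List String) (h : keys ≠ []) :
    get_all_key_value_combos keys values = (rawS keys values).map (fun s => pvUpd [] s.1) := by
  cases keys with
  | nil => exact absurd rfl h
  | cons k ks => exact A_char_aux ks k values

theorem B_char (keys : List String) (S : List (List (String × String) × List String)) :
    keys.foldl
      (fun states k => states.flatMap (fun s =>
        (List.range s.2.length).map (fun i =>
          (s.1 ++ [(k, s.2.getD i "")], s.2.take i ++ s.2.drop (i + 1))))) S
    = S.flatMap (fun s => (rawS keys s.2).map (fun t => (s.1 ++ t.1, t.2))) := by
  induction keys generalizing S with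
  | nil => simp [rawS]
  | cons k ks ih =>
    simp only [List.foldl_cons]
    rw [ih]
    simp [rawS, List.flatMap_map, List.map_flatMap, List.flatMap_assoc, List.map_map,
      Function.comp_def, List.append_assoc]

-- ===== VERDICT (by name: the statement is the Claim_ definition above) =====
theorem get_all_key_value_combos_spec : Claim_equal_get_all_key_value_combos := by
  intro keys values _ hpre
  unfold Spec_get_all_key_value_combos
  rw [A_char keys values hpre]
  show _ = get_all_key_value_combos_alt keys values
  unfold get_all_key_value_combos_alt
  rw [B_char]
  simp [pvUpd]
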